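-- pv_equiv track=rewrite | github.com/lenerd/GWV | blatt_04/search.py | portal_routes
-- ===== SOURCE A (Python) =====
-- import itertools as it
--
-- def portal_routes(portal_pairs):
--     """Return all possible routes through a set of two-way portals.
--
--     Any pair of portals is not used more than once."""
--
--     def swap(p):
--         return p[1], p[0]
--
--     routes = set()
--     for l in range(len(portal_pairs) + 1):  # use any number of portal pairs
--         for p in it.permutations(portal_pairs, l):  # use them in any order
--             for s in it.product([0, 1], repeat=l):  # use them in any direction
--                 routes.add(tuple(pi if si else swap(pi)
--                                  for pi, si in zip(p, s)))
--     return routes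
-- ===== SOURCE B (Python) =====
-- def portal_routes(portal_pairs):
--     """Return all possible routes through a set of two-way portals.
--
--     Any pair of portals is not used more than once."""
--
--     def picks(pool):
--         # all ways to pick one element: (picked, rest with order kept)
--         if not pool:
--             return []
--         head, tail = pool[0], pool[1:]
--         return [(head, tail)] + [(p, [head] + rest) for p, rest in picks(tail)]
--
--     def perms(pool, l):
--         if l == 0:
--             return [[]]
--         return [[p] + rest for p, remaining in picks(pool)
--                            for rest in perms(remaining, l - 1)]
--
--     def orientations(perm):
--         acc = [()]
--         for a, b in perm:
--             acc = [r + (q,) for r in acc for q in ((b, a), (a, b))]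
--         return acc
--
--     return set(r for l in range(len(portal_pairs) + 1)
--                  for perm in perms(list(portal_pairs), l)
--                  for r in orientations(perm))
-- ===== Notes on version B (the rewrite author's own statement) =====
-- stated objective: alternative
-- what changed: Replaces A's itertools triple loop (lengths x permutations x per-candidate 0/1-product with zip and a set.add per tuple) by recursive generation: a picks/perms recursion builds each permutation once and an incremental fold expands all its orientations in one batch, feeding a single flattened stream into one set(...) call.
import Mathlib
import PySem

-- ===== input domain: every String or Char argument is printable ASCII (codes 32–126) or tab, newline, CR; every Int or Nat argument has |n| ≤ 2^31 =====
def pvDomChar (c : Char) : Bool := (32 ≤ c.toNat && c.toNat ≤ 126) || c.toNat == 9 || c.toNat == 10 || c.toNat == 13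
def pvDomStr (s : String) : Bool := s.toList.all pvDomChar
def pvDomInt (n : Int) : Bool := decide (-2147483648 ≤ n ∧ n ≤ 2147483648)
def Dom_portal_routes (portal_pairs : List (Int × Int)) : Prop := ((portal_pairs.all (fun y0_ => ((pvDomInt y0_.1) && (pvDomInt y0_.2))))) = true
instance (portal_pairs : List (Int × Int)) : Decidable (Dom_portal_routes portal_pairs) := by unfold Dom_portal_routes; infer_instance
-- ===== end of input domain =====

-- B replaces A's itertools triple loop (length × permutations × 0/1-product, one set.add per
-- candidate) by recursive permutation generation plus incremental orientation expansion, feeding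
-- one flattened candidate stream into a single set(...) — a different decomposition of the same cost.

-- ===== PORT A =====
-- def swap(p): return p[1], p[0]
def pvSwap (p : Int × Int) : Int × Int := (p.2, p.1)

-- hand port of itertools.product([0,1], repeat=l): exact — lexicographic order, first coordinate
-- most significant, 0 before 1 (PySem has no product primitive)
def pvProd01 : Nat → List (List Int)
  | 0 => [[]]
  | l + 1 => ([0, 1] : List Int).flatMap (fun d => (pvProd01 l).map (fun s => d :: s))

def portal_routes (portal_pairs : List (Int × Int)) : List (List (Int × Int)) :=
  -- routes = set(); for l in range(len(portal_pairs)+1): for p in permutations(portal_pairs, l):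
  --   for s in product([0,1], repeat=l): routes.add(tuple(pi if si else swap(pi) for pi, si in zip(p, s)))
  (PySem.List.pyRange 0 (PySem.List.len portal_pairs + 1) 1).foldl
    (fun routes l =>
      (PySem.List.permutations portal_pairs l.toNat).foldl
        (fun routes p =>
          (pvProd01 l.toNat).foldl
            (fun routes s =>
              PySem.Set.add routes
                ((p.zip s).map (fun q => if q.2 ≠ 0 then q.1 else pvSwap q.1)))
            routes)
        routes)
    PySem.Set.empty

-- ===== PORT B =====
-- picks(pool): all ways to pick one element, with the rest in original order
def pvPicks : List (Int × Int) → List ((Int × Int) × List (Int × Int))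
  | [] => []
  | head :: tail => (head, tail) :: (pvPicks tail).map (fun q => (q.1, head :: q.2))

-- perms(pool, l)
def pvPerms : List (Int × Int) → Nat → List (List (Int × Int))
  | _, 0 => [[]]
  | pool, l + 1 =>
      (pvPicks pool).flatMap (fun pr => (pvPerms pr.2 l).map (fun rest => pr.1 :: rest))

-- orientations(perm): acc = [()]; for a, b in perm: acc = [r + (q,) for r in acc for q in ((b,a),(a,b))]
def pvOrientations (perm : List (Int × Int)) : List (List (Int × Int)) :=
  perm.foldl (fun acc p => acc.flatMap (fun r => [r ++ [(p.2, p.1)], r ++ [p]])) [[]]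

def portal_routes_alt (portal_pairs : List (Int × Int)) : List (List (Int × Int)) :=
  PySem.Set.ofList
    ((PySem.List.pyRange 0 (PySem.List.len portal_pairs + 1) 1).flatMap
      (fun l => (pvPerms portal_pairs l.toNat).flatMap (fun perm => pvOrientations perm)))

-- ===== PRECONDITION & SPEC =====
def Spec_portal_routes (portal_pairs : List (Int × Int)) (out : List (List (Int × Int))) : Prop := out = portal_routes_alt portal_pairs
instance (portal_pairs : List (Int × Int)) (out : List (List (Int × Int))) : Decidable (Spec_portal_routes portal_pairs out) := by unfold Spec_portal_routes; infer_instance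

-- ===== CLAIM (what is proved, stated in full; the proofs are below) =====
def Claim_equal_portal_routes : Prop := ∀ (portal_pairs : List (Int × Int)), Dom_portal_routes portal_pairs → Spec_portal_routes portal_pairs (portal_routes portal_pairs)

-- ===== LEMMAS AND PROOFS =====

-- head-recursive characterisation of the orientation lists (binary-counting order, swap first)
def pvOrientList : List (Int × Int) → List (List (Int × Int))
  | [] => [[]]
  | q :: p => (pvOrientList p).map (fun t => pvSwap q :: t) ++ (pvOrientList p).map (fun t => q :: t)

lemma pvOrientations_fold (p : List (Int × Int)) (acc : List (List (Int × Int))) :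
    p.foldl (fun acc p => acc.flatMap (fun r => [r ++ [(p.2, p.1)], r ++ [p]])) acc
      = acc.flatMap (fun r => (pvOrientList p).map (fun t => r ++ t)) := by
  induction p generalizing acc with
  | nil => simp [pvOrientList]
  | cons q p ih =>
      simp only [List.foldl_cons, ih, pvOrientList, List.flatMap_assoc]
      simp [pvSwap, List.map_map, Function.comp_def, List.append_assoc]

lemma pvOrientations_eq (p : List (Int × Int)) : pvOrientations p = pvOrientList p := by
  simp [pvOrientations, pvOrientations_fold]

lemma pvProd01_route_eq (p : List (Int × Int)) :
    (pvProd01 p.length).map (fun s => (p.zip s).map (fun q => if q.2 ≠ 0 then q.1 else pvSwap q.1))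
      = pvOrientList p := by
  induction p with
  | nil => simp [pvProd01, pvOrientList]
  | cons q p ih =>
      simp only [List.length_cons, pvProd01, pvOrientList, ← ih]
      simp [List.map_map, Function.comp_def, List.zip_cons_cons]

lemma pvFlatMap_range_eq_picks {β : Type} (xs : List (Int × Int))
    (g : (Int × Int) → List (Int × Int) → List β) :
    (List.range xs.length).flatMap
        (fun i => (xs[i]?).elim [] (fun x => g x (xs.eraseIdx i)))
      = (pvPicks xs).flatMap (fun q => g q.1 q.2) := by
  induction xs generalizing g with
  | nil => simp [pvPicks]
  | cons x xs ih =>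
      rw [List.length_cons, List.range_succ_eq_map, List.flatMap_cons, List.flatMap_map]
      simp only [List.getElem?_cons_succ, List.eraseIdx_cons_succ]
      rw [show (((x :: xs)[0]?).elim [] fun y => g y ((x :: xs).eraseIdx 0)) = g x xs by rfl,
          ih (fun y rest => g y (x :: rest))]
      simp [pvPicks, List.flatMap_map]

lemma pvPermutations_eq (r : Nat) : ∀ pool : List (Int × Int),
    PySem.List.permutations pool r = pvPerms pool r := by
  induction r with
  | zero => intro pool; rfl
  | succ r ih =>
      intro pool
      have hunfold : PySem.List.permutations pool (r + 1)
          = (List.range pool.length).flatMap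
              (fun i => (pool[i]?).elim []
                (fun x => (PySem.List.permutations (pool.eraseIdx i) r).map (fun p => x :: p))) := by
        rw [PySem.List.permutations]
        congr 1
        funext i
        cases pool[i]? <;> rfl
      rw [hunfold]
      simp only [ih]
      rw [pvFlatMap_range_eq_picks pool (fun x rest => (pvPerms rest r).map (fun p => x :: p))]
      rfl

lemma pvPerms_length {r : Nat} : ∀ {pool p : List (Int × Int)}, p ∈ pvPerms pool r → p.length = r := by
  induction r with
  | zero => intro pool p hp; simp [pvPerms] at hp; simp [hp]
  | succ r ih =>
      intro pool p hp
      simp only [pvPerms, List.mem_flatMap, List.mem_map] at hp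
      obtain ⟨pr, _, rest, hrest, rfl⟩ := hp
      simp [ih hrest]

lemma pvInner_fold (l : Nat) (p : List (Int × Int)) (hp : p.length = l)
    (routes : List (List (Int × Int))) :
    (pvProd01 l).foldl
        (fun routes s =>
          PySem.Set.add routes ((p.zip s).map (fun q => if q.2 ≠ 0 then q.1 else pvSwap q.1)))
        routes
      = (pvOrientations p).foldl PySem.Set.add routes := by
  subst hp
  rw [pvOrientations_eq, ← pvProd01_route_eq, List.foldl_map]

-- ===== VERDICT (by name: the statement is the Claim_ definition above) =====
theorem portal_routes_spec : Claim_equal_portal_routes := by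
  intro portal_pairs _
  show portal_routes portal_pairs = portal_routes_alt portal_pairs
  unfold portal_routes portal_routes_alt
  rw [PySem.Set.ofList_eq_foldl, List.foldl_flatMap]
  refine PySem.List.foldl_congr_mem _ _ _ _ ?_
  intro routes l _
  rw [List.foldl_flatMap, pvPermutations_eq]
  refine PySem.List.foldl_congr_mem _ _ _ _ ?_
  intro routes' p hp
  exact pvInner_fold l.toNat p (pvPerms_length hp) routes'
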